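-- pv_equiv track=rewrite | github.com/Stegen54/100-Days-Of-Code_Python | Day38100Days-main/Day38100Days-main/main.py | rainbowize
-- ===== SOURCE A (Python) =====
-- def rainbowize(sentence):
--   """Transform the sentence into a rainbow-ized string."""
--   colors = {
--       'r': "\033[31m",  # Red
--       'g': "\033[32m",  # Green
--       'b': "\033[34m",  # Blue
--       'y': "\033[33m",  # Yellow
--       'p': "\033[35m"   # Purple
--   }
--   reset = "\033[0m"
--   output = ""
--   current_color = reset
--
--   for char in sentence:
--       if char.lower() in colors:
--           current_color = colors[char.lower()]
--       elif char == ' ':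
--           current_color = reset
--
--       output += f"{current_color}{char}"
--
--   output += reset  # Ensure color is reset at the end
--   return output
-- ===== SOURCE B (Python) =====
-- def rainbowize(sentence):
--     """Transform the sentence into a rainbow-ized string."""
--     colors = {
--         'r': "\033[31m",  # Red
--         'g': "\033[32m",  # Green
--         'b': "\033[34m",  # Blue
--         'y': "\033[33m",  # Yellow
--         'p': "\033[35m"   # Purple
--     }
--     reset = "\033[0m"
--
--     def trigger(ch):
--         """The color code this character switches to, or None."""
--         low = ch.lower()
--         if low in colors:
--             return colors[low]
--         if ch == ' ':
--             return reset
--         return None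
--
--     def run(chars):
--         """Split off the longest prefix containing no trigger character."""
--         for i, ch in enumerate(chars):
--             if trigger(ch) is not None:
--                 return chars[:i], chars[i:]
--         return chars, ''
--
--     def render(color, text):
--         """Each character of the chunk prefixed with its (constant) color."""
--         return color + color.join(text) if text else ''
--
--     head, rest = run(sentence)
--     parts = [render(reset, head)]
--     while rest:
--         ch, tail = rest[0], rest[1:]
--         body, rest = run(tail)
--         parts.append(render(trigger(ch), ch + body))
--     return "".join(parts) + reset
-- ===== Notes on version B (the rewrite author's own statement) =====
-- stated objective: alternative
-- what changed: A's per-character state machine (carry current color, append color+char each step) is replaced by a chunk decomposition: the sentence is split into maximal runs delimited by color-letter/space trigger characters, and each chunk is rendered at once with its constant color via str.join; no color state is carried across the output loop.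
import Mathlib
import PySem

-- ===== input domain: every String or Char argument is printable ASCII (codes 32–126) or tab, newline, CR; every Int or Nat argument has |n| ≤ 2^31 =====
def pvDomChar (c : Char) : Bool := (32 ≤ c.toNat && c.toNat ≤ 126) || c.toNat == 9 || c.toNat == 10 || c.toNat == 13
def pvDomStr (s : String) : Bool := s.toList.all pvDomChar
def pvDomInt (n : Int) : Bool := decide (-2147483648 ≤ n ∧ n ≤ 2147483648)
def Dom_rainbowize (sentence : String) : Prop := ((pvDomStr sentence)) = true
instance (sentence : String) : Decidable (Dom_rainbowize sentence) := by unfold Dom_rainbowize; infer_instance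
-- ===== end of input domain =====

-- B replaces A's per-character color-state loop by a chunk decomposition (split at trigger
-- characters, render each constant-color chunk via join); objective: alternative, same output.

-- ===== PORT A =====
-- the colors dict (keys are the 1-char strings, held as Char) and the reset code
def pvColors : PySem.Dict Char (List Char) :=
  PySem.Dict.ofList [('r', "\x1b[31m".toList), ('g', "\x1b[32m".toList), ('b', "\x1b[34m".toList),
   ('y', "\x1b[33m".toList), ('p', "\x1b[35m".toList)]

def pvReset : List Char := "\x1b[0m".toList

-- A's single loop: state = (output, current_color); strings built as List Char (exact for Python str concat)
def rainbowize (sentence : String) : String :=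
  let r := sentence.toList.foldl
    (fun (st : List Char × List Char) ch =>
      let cur :=
        match PySem.Dict.get? pvColors (PySem.Chars.lowerChar ch) with
        | some col => col
        | none => if ch = ' ' then pvReset else st.2
      (st.1 ++ cur ++ [ch], cur))
    ([], pvReset)
  String.ofList (r.1 ++ pvReset)

-- ===== PORT B =====
-- Source B's `trigger`: the color this character switches to, or none
def pvTrigger (ch : Char) : Option (List Char) :=
  match PySem.Dict.get? pvColors (PySem.Chars.lowerChar ch) with
  | some col => some col
  | none => if ch = ' ' then some pvReset else none

-- Source B's `run` (the for/enumerate loop as its obvious structural recursion):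
-- longest trigger-free prefix, and the rest
def pvRun : List Char → List Char × List Char
  | [] => ([], [])
  | ch :: t =>
      if (pvTrigger ch).isSome then ([], ch :: t)
      else
        let p := pvRun t
        (ch :: p.1, p.2)

-- Source B's `render`: color + color.join(text) if text else ''
def pvRender (color text : List Char) : List Char :=
  if text ≠ [] then color ++ PySem.Chars.join color (text.map (fun c => [c])) else []

theorem pvRun_snd_length_le (l : List Char) : (pvRun l).2.length ≤ l.length := by
  induction l with
  | nil => simp [pvRun]
  | cons ch t ih =>
      simp only [pvRun]
      split
      · simp
      · simpa using Nat.le_succ_of_le ih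

-- Source B's while loop over `rest` (each pass consumes rest[0]); `.getD pvReset` only
-- totalizes trigger(rest[0]), which is never None in the loop
def pvLoop : List Char → List (List Char)
  | [] => []
  | ch :: t =>
      let p := pvRun t
      pvRender ((pvTrigger ch).getD pvReset) (ch :: p.1) :: pvLoop p.2
termination_by l => l.length
decreasing_by
  simpa using Nat.lt_succ_of_le (pvRun_snd_length_le t)

-- head/rest split, render the chunks, "".join(parts) + reset
def rainbowize_alt (sentence : String) : String :=
  let p := pvRun sentence.toList
  String.ofList
    (PySem.Chars.join [] (pvRender pvReset p.1 :: pvLoop p.2) ++ pvReset)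

-- ===== PRECONDITION & SPEC =====
def Spec_rainbowize (sentence : String) (out : String) : Prop := out = rainbowize_alt sentence
instance (sentence : String) (out : String) : Decidable (Spec_rainbowize sentence out) := by unfold Spec_rainbowize; infer_instance

-- ===== CLAIM (what is proved, stated in full; the proofs are below) =====
def Claim_equal_rainbowize : Prop := ∀ (sentence : String), Dom_rainbowize sentence → Spec_rainbowize sentence (rainbowize sentence)

-- ===== LEMMAS AND PROOFS =====

-- A's per-character rendering with carried color state
def pvR (c0 : List Char) : List Char → List Char
  | [] => []
  | ch :: t =>
      let c := (pvTrigger ch).getD c0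
      c ++ [ch] ++ pvR c t

-- A's cur-update is trigger.getD of the previous color
theorem pv_cur_eq (c : List Char) (ch : Char) :
    (match PySem.Dict.get? pvColors (PySem.Chars.lowerChar ch) with
      | some col => col
      | none => if ch = ' ' then pvReset else c) = (pvTrigger ch).getD c := by
  unfold pvTrigger
  cases PySem.Dict.get? pvColors (PySem.Chars.lowerChar ch)
  · simp only []
    split <;> simp
  · simp

theorem pv_loopA (l : List Char) : ∀ (out c0 : List Char),
    (List.foldl
      (fun (st : List Char × List Char) ch =>
        let cur :=
          match PySem.Dict.get? pvColors (PySem.Chars.lowerChar ch) with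
          | some col => col
          | none => if ch = ' ' then pvReset else st.2
        (st.1 ++ cur ++ [ch], cur))
      (out, c0) l).1 = out ++ pvR c0 l := by
  induction l with
  | nil => intro out c0; simp [pvR]
  | cons ch t ih =>
      intro out c0
      rw [List.foldl_cons]
      show (List.foldl _
        (out ++ (match PySem.Dict.get? pvColors (PySem.Chars.lowerChar ch) with
          | some col => col
          | none => if ch = ' ' then pvReset else c0) ++ [ch], _) t).1 = _
      rw [pv_cur_eq, ih, pvR]
      simp

-- color.join over the chunk's singletons, flattened out
theorem pv_join_sing (c : List Char) (x : Char) : ∀ (r : List Char),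
    PySem.Chars.join c ((x :: r).map (fun ch => [ch]))
      = [x] ++ r.flatMap (fun ch => c ++ [ch]) := by
  intro r
  induction r generalizing x with
  | nil => simp [PySem.Chars.join_singleton]
  | cons y r' ih =>
      simp only [List.map_cons, PySem.Chars.join_cons_cons]
      rw [show ([y] :: r'.map (fun ch => [ch])) = (y :: r').map (fun ch => [ch]) by simp,
        ih y]
      simp

-- a chunk rendered by join is the per-character color-prefix form
theorem pv_render_flat (c : List Char) : ∀ (a : List Char),
    pvRender c a = a.flatMap (fun ch => c ++ [ch]) := by
  intro a
  cases a with
  | nil => simp [pvRender]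
  | cons x r =>
      simp only [pvRender, if_pos (by simp : (x :: r : List Char) ≠ [])]
      rw [pv_join_sing c x r]
      simp

-- B's chunked rendering equals A's stateful rendering
theorem pv_main (l : List Char) : ∀ (c : List Char),
    pvR c l = (pvRun l).1.flatMap (fun ch => c ++ [ch]) ++ (pvLoop (pvRun l).2).flatten := by
  induction l with
  | nil => intro c; simp [pvR, pvRun, pvLoop]
  | cons ch t ih =>
      intro c
      by_cases h : (pvTrigger ch).isSome
      · obtain ⟨col, hcol⟩ := Option.isSome_iff_exists.mp h
        simp only [pvRun, if_pos h, List.flatMap_nil, List.nil_append]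
        rw [pvLoop, List.flatten_cons, pv_render_flat, pvR, ih]
        simp [hcol]
      · have hn : pvTrigger ch = none := Option.not_isSome_iff_eq_none.mp h
        simp only [pvRun, if_neg h]
        rw [pvR, ih]
        simp [hn]

-- "".join(parts) is flatten
theorem pv_join_nil : ∀ (ps : List (List Char)), PySem.Chars.join [] ps = ps.flatten := by
  intro ps
  induction ps with
  | nil => simp [PySem.Chars.join_nil]
  | cons p r ih =>
      cases r with
      | nil => simp [PySem.Chars.join_singleton]
      | cons q r' => rw [PySem.Chars.join_cons_cons, ih]; simp

-- ===== VERDICT (by name: the statement is the Claim_ definition above) =====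
theorem rainbowize_spec : Claim_equal_rainbowize := by
  intro s _
  show rainbowize s = rainbowize_alt s
  simp only [rainbowize, rainbowize_alt]
  rw [pv_loopA]
  rw [pv_join_nil]
  simp [List.flatten, pv_render_flat, pv_main]
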